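-- pv_equiv track=rewrite | github.com/eshun4/Data-Structures-and-Algorithms-in-Python-2024 | Sets_Maps/has_all_distinct_of_size_k.py | has_all_distinct_window
-- ===== SOURCE A (Python) =====
-- def has_all_distinct_window(s: str, k: int) -> bool:
--     # create a hahmap
--     count= {}
--     # early exit
--     if k > len(s):
--         return False
--
--     if k == 0:
--         return True
--
--     left = 0
--     # iterate through string with right pointer
--     for right in range(len(s)):
--         count[s[right]] = count.get(s[right], 0) + 1
--
--         # keep window size <= k
--         if right - left + 1 > k:
--             count[s[left]] -= 1
--             if count[s[left]] == 0:
--                 del count[s[left]]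
--             left += 1
--         # wiondow is of size k
--         if  right - left + 1 == k and len(count) == k:
--             return True
--
--     return False
-- ===== SOURCE B (Python) =====
-- def has_all_distinct_window(s: str, k: int) -> bool:
--     if k < 0 or k > len(s):
--         return False
--     return any(len(set(s[i:i + k])) == k for i in range(len(s) - k + 1))
-- ===== Notes on version B (the rewrite author's own statement) =====
-- stated objective: simpler
-- what changed: Replaced the sliding-window pass with a running count dict and left pointer by a direct scan over window start indices that rebuilds a fresh set per window and compares its size to k.
import Mathlib
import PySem

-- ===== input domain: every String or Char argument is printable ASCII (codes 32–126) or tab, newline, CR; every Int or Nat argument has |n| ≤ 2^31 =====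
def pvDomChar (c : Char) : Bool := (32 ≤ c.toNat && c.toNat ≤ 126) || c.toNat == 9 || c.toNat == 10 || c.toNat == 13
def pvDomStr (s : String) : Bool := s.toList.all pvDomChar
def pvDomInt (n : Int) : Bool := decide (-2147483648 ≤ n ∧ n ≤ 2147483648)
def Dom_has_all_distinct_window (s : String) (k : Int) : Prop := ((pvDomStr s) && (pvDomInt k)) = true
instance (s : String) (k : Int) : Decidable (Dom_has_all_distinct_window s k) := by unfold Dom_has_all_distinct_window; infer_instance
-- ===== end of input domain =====

-- B replaces A's sliding-window pass (count dict + left pointer) by a direct scan over window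
-- start indices that rebuilds a fresh set per window; objective: simpler, not faster.

-- ===== PORT A =====
-- A's 'for right in range(len(s))' loop with early return, as structural recursion over the
-- list of right-indices; state = (count dict, left pointer).
def pvAGo (cs : List Char) (k : Int) : List Int → PySem.Dict Char Int → Int → Bool
  | [], _, _ => false
  | r :: rs, count0, left0 =>
    -- count[s[right]] = count.get(s[right], 0) + 1  (s[right]: index always in range here)
    let c := PySem.List.pyGetD cs r ' '
    let count1 := count0.insert c (count0.getD c 0 + 1)
    let st :=
      if r - left0 + 1 > k then
        -- count[s[left]] -= 1; if count[s[left]] == 0: del count[s[left]]; left += 1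
        -- (s[left] is always a key of count here, so reading it via getD 0 is exact)
        let cl := PySem.List.pyGetD cs left0 ' '
        let count2 := count1.insert cl (count1.getD cl 0 - 1)
        ((if count2.getD cl 0 == 0 then count2.erase cl else count2), left0 + 1)
      else (count1, left0)
    if (r - st.2 + 1 == k) && ((st.1.size : Int) == k) then true
    else pvAGo cs k rs st.1 st.2

def has_all_distinct_window (s : String) (k : Int) : Bool :=
  let cs := s.toList
  if k > (cs.length : Int) then false
  else if k == 0 then true
  else pvAGo cs k (PySem.List.pyRange 0 (cs.length : Int)) PySem.Dict.empty 0

-- ===== PORT B =====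
def has_all_distinct_window_alt (s : String) (k : Int) : Bool :=
  let cs := s.toList
  if k < 0 || k > (cs.length : Int) then false
  else (PySem.List.pyRange 0 ((cs.length : Int) - k + 1)).any (fun i =>
    ((PySem.Set.ofList (PySem.List.slice cs (some i) (some (i + k)))).length : Int) == k)

-- ===== PRECONDITION & SPEC =====
def Spec_has_all_distinct_window (s : String) (k : Int) (out : Bool) : Prop := out = has_all_distinct_window_alt s k
instance (s : String) (k : Int) (out : Bool) : Decidable (Spec_has_all_distinct_window s k out) := by unfold Spec_has_all_distinct_window; infer_instance

-- ===== CLAIM (what is proved, stated in full; the proofs are below) =====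
def Claim_equal_has_all_distinct_window : Prop := ∀ (s : String) (k : Int), Dom_has_all_distinct_window s k → Spec_has_all_distinct_window s k (has_all_distinct_window s k)

-- ===== LEMMAS AND PROOFS =====

-- Dict.erase facts (not in the PySem book)
theorem pv_get?_erase {ν : Type} (d : PySem.Dict Char ν) (c x : Char) :
    (d.erase c).get? x = if x = c then none else d.get? x := by
  rcases eq_or_ne x c with rfl | hxc
  · rw [if_pos rfl]
    have h : List.find? (fun p => p.1 == x) ((d.items).filter (fun p => !p.1 == x)) = none := by
      rw [List.find?_eq_none]
      intro a ha
      have := List.of_mem_filter ha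
      simp at this ⊢
      exact this
    simp [PySem.Dict.erase, PySem.Dict.get?, h]
  · rw [if_neg hxc]
    simp only [PySem.Dict.erase, PySem.Dict.get?]
    have h : (fun (a : Char × ν) => decide ((!a.1 == c) = true ∧ (a.1 == x) = true))
        = (fun (a : Char × ν) => a.1 == x) := by
      funext a
      by_cases hax : a.1 = x <;> simp [hax, hxc]
    rw [List.find?_filter, h]

theorem pv_getD_erase {ν : Type} (d : PySem.Dict Char ν) (c x : Char) (v : ν) :
    (d.erase c).getD x v = if x = c then v else d.getD x v := by
  simp [PySem.Dict.getD, pv_get?_erase]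
  split <;> rfl

theorem pv_keys_erase_sublist {ν : Type} (d : PySem.Dict Char ν) (c : Char) :
    (d.erase c).keys.Sublist d.keys :=
  List.Sublist.map _ List.filter_sublist

theorem pv_mem_items_erase {ν : Type} (d : PySem.Dict Char ν) (c : Char) {p : Char × ν}
    (h : p ∈ (d.erase c).items) : p ∈ d.items :=
  List.mem_of_mem_filter h

-- the loop invariant: the dict is exactly the (positive) character counter of the window w
def pvCGood (d : PySem.Dict Char Int) (w : List Char) : Prop :=
  (∀ c, d.getD c 0 = (w.count c : Int)) ∧ d.keys.Nodup ∧ ∀ p ∈ d.items, p.2 ≠ 0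

theorem pvCGood_empty : pvCGood PySem.Dict.empty [] := by
  refine ⟨fun c => by simp [PySem.Dict.getD_empty], PySem.Dict.nodup_keys_empty, ?_⟩
  intro p hp
  simp [PySem.Dict.empty] at hp

theorem pvCGood_size {d : PySem.Dict Char Int} {w : List Char} (h : pvCGood d w) :
    d.size = (PySem.Set.ofList w).length := by
  obtain ⟨hget, hnd, hval⟩ := h
  have hmem : ∀ c, c ∈ d.keys ↔ c ∈ PySem.Set.ofList w := by
    intro c
    rw [PySem.Set.mem_ofList]
    constructor
    · intro hc
      obtain ⟨p, hp, hpc⟩ := List.mem_map.mp hc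
      have hpc' : (c, p.2) ∈ d.items := by rwa [← hpc, Prod.mk.eta]
      have hv : d.getD c 0 = p.2 := PySem.Dict.getD_of_mem_items d hpc' hnd 0
      have hne : p.2 ≠ 0 := hval p hp
      rw [hget c] at hv
      have : w.count c ≠ 0 := by
        intro h0
        rw [h0] at hv
        exact hne (by exact_mod_cast hv.symm)
      exact List.count_pos_iff.mp (Nat.pos_of_ne_zero this)
    · intro hcw
      by_contra hck
      have h0 : d.get? c = none := (PySem.Dict.get?_eq_none_iff_not_mem_keys d c).mpr hck
      have : d.getD c 0 = 0 := by rw [PySem.Dict.getD, h0]; rfl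
      rw [hget c] at this
      have : w.count c = 0 := by exact_mod_cast this
      have := List.count_pos_iff.mpr hcw
      omega
  have hperm : d.keys.Perm (PySem.Set.ofList w) :=
    (List.perm_ext_iff_of_nodup hnd (PySem.Set.nodup_ofList w)).mpr hmem
  calc d.size = d.keys.length := (List.length_map _).symm
    _ = (PySem.Set.ofList w).length := hperm.length_eq

theorem pvCGood_insert {d : PySem.Dict Char Int} {w : List Char} (h : pvCGood d w) (c : Char) :
    pvCGood (d.insert c (d.getD c 0 + 1)) (w ++ [c]) := by
  obtain ⟨hget, hnd, hval⟩ := h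
  refine ⟨?_, PySem.Dict.nodup_keys_insert d c _ hnd, ?_⟩
  · intro x
    rw [PySem.Dict.getD_insert]
    by_cases hx : x = c
    · subst hx
      rw [if_pos rfl, hget x]
      simp [List.count_append]
    · rw [if_neg hx, hget x]
      simp [List.count_append, Ne.symm hx]
  · intro p hp
    rw [PySem.Dict.mem_items_insert] at hp
    rcases hp with rfl | ⟨hp, _⟩
    · have : (0 : Int) ≤ (w.count c : Int) := by positivity
      rw [hget c]
      simp only
      omega
    · exact hval p hp

theorem pvCGood_shrink {d : PySem.Dict Char Int} {c : Char} {w : List Char}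
    (h : pvCGood d (c :: w)) :
    pvCGood (if (d.insert c (d.getD c 0 - 1)).getD c 0 == 0
             then (d.insert c (d.getD c 0 - 1)).erase c
             else d.insert c (d.getD c 0 - 1)) w := by
  obtain ⟨hget, hnd, hval⟩ := h
  have hd1get : ∀ x, (d.insert c (d.getD c 0 - 1)).getD x 0 = (w.count x : Int) := by
    intro x
    rw [PySem.Dict.getD_insert]
    by_cases hx : x = c
    · subst hx
      rw [if_pos rfl, hget x]
      simp
    · rw [if_neg hx, hget x]
      simp [Ne.symm hx]
  have hd1nd := PySem.Dict.nodup_keys_insert d c (d.getD c 0 - 1) hnd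
  have hcond : ((d.insert c (d.getD c 0 - 1)).getD c 0 == 0) = decide (w.count c = 0) := by
    rw [hd1get c]
    by_cases hw : w.count c = 0 <;> simp [hw]
  rw [hcond]
  by_cases hw : w.count c = 0
  · rw [if_pos (by simp [hw])]
    refine ⟨?_, ?_, ?_⟩
    · intro x
      rw [pv_getD_erase]
      by_cases hx : x = c
      · subst hx
        rw [if_pos rfl, hw]
        simp
      · rw [if_neg hx]
        exact hd1get x
    · exact List.Nodup.sublist (pv_keys_erase_sublist _ c) hd1nd
    · intro p hp
      have hpne : p.1 ≠ c := by
        have := List.of_mem_filter hp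
        simpa using this
      have hp' := pv_mem_items_erase _ c hp
      rw [PySem.Dict.mem_items_insert] at hp'
      rcases hp' with rfl | ⟨hp', _⟩
      · exact absurd rfl hpne
      · exact hval p hp'
  · rw [if_neg (by simp [hw])]
    refine ⟨hd1get, hd1nd, ?_⟩
    · intro p hp
      rw [PySem.Dict.mem_items_insert] at hp
      rcases hp with rfl | ⟨hp, _⟩
      · have : d.getD c 0 = ((c :: w).count c : Int) := hget c
        simp only [List.count_cons_self] at this
        simp only [this]
        intro hcontra
        have : w.count c = 0 := by push_cast at hcontra ⊢; omega
        exact hw this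
      · exact hval p hp

-- the per-right-index success test A's check amounts to
def pvP (cs : List Char) (K : Nat) (j : Nat) : Bool :=
  decide (K ≤ j + 1 ∧ (PySem.Set.ofList (List.take K (List.drop (j + 1 - K) cs))).length = K)

theorem pvCheck (cs : List Char) (K : Nat) (r : Nat) (d1 : PySem.Dict Char Int)
    (hg1 : pvCGood d1 (List.drop (r + 1 - K) (List.take (r + 1) cs))) :
    (((r : Int) - ((r + 1 - K : Nat) : Int) + 1 == (K : Int)) && ((d1.size : Int) == (K : Int)))
      = pvP cs K r := by
  rw [Bool.eq_iff_iff]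
  simp only [pvP, Bool.and_eq_true, beq_iff_eq, decide_eq_true_eq, pvCGood_size hg1]
  constructor
  · rintro ⟨h1, h2⟩
    have hk1 : K ≤ r + 1 := by omega
    have he : (r + 1) - (r + 1 - K) = K := by omega
    rw [List.drop_take, he] at h2
    exact ⟨hk1, by exact_mod_cast h2⟩
  · rintro ⟨hk1, h2⟩
    have he : (r + 1) - (r + 1 - K) = K := by omega
    refine ⟨by omega, ?_⟩
    rw [List.drop_take, he]
    exact_mod_cast h2

theorem pvAGo_eq (cs : List Char) (K : Nat) (hK : 1 ≤ K) :
    ∀ (m r : Nat) (d : PySem.Dict Char Int), r + m = cs.length →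
      pvCGood d (List.drop (r - K) (List.take r cs)) →
      pvAGo cs (K : Int) ((List.range' r m).map (fun (j : Nat) => (j : Int))) d ((r - K : Nat) : Int)
        = (List.range' r m).any (pvP cs K) := by
  intro m
  induction m with
  | zero => intro r d _ _; simp [pvAGo]
  | succ m ih =>
    intro r d hrm hg
    have hrn : r < cs.length := by omega
    rw [List.range'_succ, List.map_cons, pvAGo, List.any_cons]
    have hc : PySem.List.pyGetD cs ((r : Nat) : Int) ' ' = cs[r] := by
      rw [PySem.List.pyGetD_natCast]; exact List.getD_eq_getElem _ _ hrn
    have hW1 : List.drop (r - K) (List.take (r + 1) cs)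
        = List.drop (r - K) (List.take r cs) ++ [cs[r]] := by
      rw [List.take_add_one, List.getElem?_eq_getElem hrn, Option.toList_some,
        List.drop_append_of_le_length (by rw [List.length_take]; omega)]
    have hg1 : pvCGood (d.insert cs[r] (d.getD cs[r] 0 + 1))
        (List.drop (r - K) (List.take (r + 1) cs)) := by
      rw [hW1]; exact pvCGood_insert hg cs[r]
    by_cases hrK : K ≤ r
    · -- the window is full: the left pointer moves
      have hcond : ((r : Int) - ((r - K : Nat) : Int) + 1 > ((K : Nat) : Int)) := by omega
      have hcl : PySem.List.pyGetD cs ((r - K : Nat) : Int) ' ' = cs[r - K]'(by omega) := by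
        rw [PySem.List.pyGetD_natCast]; exact List.getD_eq_getElem _ _ (by omega)
      have hlen : r - K < (List.take (r + 1) cs).length := by
        rw [List.length_take]; omega
      have hW2 : List.drop (r - K) (List.take (r + 1) cs)
          = cs[r - K]'(by omega) :: List.drop (r + 1 - K) (List.take (r + 1) cs) := by
        rw [List.drop_eq_getElem_cons hlen, List.getElem_take]
        congr 2
        omega
      have hg2 := hg1
      rw [hW2] at hg2
      have hg3 := pvCGood_shrink hg2
      simp only [hc, hcl, if_pos hcond]
      have hlcast : ((r - K : Nat) : Int) + 1 = ((r + 1 - K : Nat) : Int) := by omega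
      rw [hlcast, pvCheck cs K r _ hg3, ih (r + 1) _ (by omega) hg3]
      cases pvP cs K r <;> simp
    · -- the window is still growing: no shrink
      have hcond : ¬ ((r : Int) - ((r - K : Nat) : Int) + 1 > ((K : Nat) : Int)) := by omega
      simp only [hc, if_neg hcond]
      have hg1' := hg1
      have hidx : r - K = r + 1 - K := by omega
      rw [hidx] at hg1'
      rw [show ((r - K : Nat) : Int) = ((r + 1 - K : Nat) : Int) by rw [hidx]]
      rw [pvCheck cs K r _ hg1', ih (r + 1) _ (by omega) hg1']
      cases pvP cs K r <;> simp

theorem pvAGo_neg (cs : List Char) (k : Int) (hk : k < 0) :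
    ∀ (m r : Nat), pvAGo cs k ((List.range' r m).map (fun (j : Nat) => (j : Int))) PySem.Dict.empty (r : Int) = false := by
  intro m
  induction m with
  | zero => intro r; simp [pvAGo]
  | succ m ih =>
    intro r
    rw [List.range'_succ, List.map_cons, pvAGo]
    have h1 : ((r : Int) - (r : Int) + 1 > k) := by omega
    have h2 : ((r : Int) - ((r : Int) + 1) + 1 == k) = false := by
      rw [beq_eq_false_iff_ne]; omega
    simp only [h1, if_true, h2, Bool.false_and]
    simp [PySem.Dict.empty, PySem.Dict.insert, PySem.Dict.contains, PySem.Dict.get?,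
      PySem.Dict.getD, PySem.Dict.erase, List.filter]
    have hcast : ((r : Int) + 1) = ((r + 1 : Nat) : Int) := by push_cast; ring
    rw [hcast]
    exact ih (r + 1)

theorem pvAnyBridge (cs : List Char) (K : Nat) (hK : 1 ≤ K) (hKn : K ≤ cs.length) :
    (List.range cs.length).any (pvP cs K)
      = (List.range (cs.length - K + 1)).any
          (fun j => decide ((PySem.Set.ofList (List.take K (List.drop j cs))).length = K)) := by
  rw [Bool.eq_iff_iff]
  simp only [List.any_eq_true, List.mem_range, pvP, decide_eq_true_eq]
  constructor
  · rintro ⟨r, hr, h1, h2⟩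
    exact ⟨r + 1 - K, by omega, h2⟩
  · rintro ⟨j, hj, hp⟩
    refine ⟨j + K - 1, by omega, by omega, ?_⟩
    have h2 : j + K - 1 + 1 - K = j := by omega
    rw [h2]
    exact hp

-- ===== VERDICT (by name: the statement is the Claim_ definition above) =====
theorem has_all_distinct_window_spec : Claim_equal_has_all_distinct_window := by
  intro s k _
  unfold Spec_has_all_distinct_window has_all_distinct_window has_all_distinct_window_alt
  simp only
  set cs := s.toList with hcs
  set n := cs.length with hn
  have hn0 : (0 : Int) ≤ (n : Int) := Int.natCast_nonneg n
  rcases lt_trichotomy k 0 with hkneg | hk0 | hkpos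
  · -- k < 0: A's loop never finds a window of negative size; B's guard returns False
    rw [if_neg (by omega : ¬ k > (n : Int)),
      if_neg (by simp [beq_iff_eq]; omega : ¬ (k == 0) = true),
      if_pos (by simp [hkneg] : (decide (k < 0) || decide (k > (n : Int))) = true)]
    rw [PySem.List.pyRange_zero_natCast, List.range_eq_range',
      show (0 : Int) = ((0 : Nat) : Int) from rfl]
    exact pvAGo_neg cs k hkneg n 0
  · -- k = 0: A returns True early; B's window at start index 0 is empty
    subst hk0
    rw [if_neg (by omega : ¬ (0 : Int) > (n : Int)), if_pos (by simp),
      if_neg (by simp : ¬ (decide ((0 : Int) < 0) || decide ((0 : Int) > (n : Int))) = true)]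
    rw [Bool.eq_iff_iff]
    constructor
    · intro _
      simp only [List.any_eq_true, PySem.List.mem_pyRange_one]
      exact ⟨0, ⟨le_refl _, by omega⟩, by simp [PySem.List.slice_to]⟩
    · intro _
      rfl
  · by_cases hbig : (n : Int) < k
    · -- k > len(s): both return False
      rw [if_pos (by omega : k > (n : Int)),
        if_pos (by simp; omega : (decide (k < 0) || decide (k > (n : Int))) = true)]
    · -- 1 ≤ k ≤ len(s): the main case
      set K := k.toNat with hKdef
      have hkK : k = (K : Int) := (Int.toNat_of_nonneg (by omega)).symm
      have hK1 : 1 ≤ K := by omega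
      have hKn : K ≤ n := by omega
      rw [if_neg (by omega : ¬ k > (n : Int)),
        if_neg (by simp [beq_iff_eq]; omega : ¬ (k == 0) = true),
        if_neg (by simp; omega : ¬ (decide (k < 0) || decide (k > (n : Int))) = true)]
      -- A's loop computes the window-ending-at-r test over all right indices
      have hA := pvAGo_eq cs K hK1 n 0 PySem.Dict.empty (by omega) (by simpa using pvCGood_empty)
      simp only [Nat.zero_sub, Nat.cast_zero] at hA
      rw [hkK, PySem.List.pyRange_zero_natCast, List.range_eq_range', hA, ← List.range_eq_range']
      -- B's scan over window start indices
      rw [show (n : Int) - (K : Int) + 1 = ((n - K + 1 : Nat) : Int) by omega,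
        PySem.List.pyRange_zero_natCast, List.any_map]
      rw [pvAnyBridge cs K hK1 hKn]
      apply PySem.List.any_congr_mem
      intro j hj
      simp only [Function.comp_apply, PySem.List.slice_natCast_add]
      rw [Bool.eq_iff_iff]
      simp
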